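-- pv_equiv track=rewrite | github.com/GLMasters/TP-IGL | server/app/Utils/__init__.py | institutions_authors_processing
-- ===== SOURCE A (Python) =====
-- def institutions_authors_processing(header):
--     authors = []
--     institutions = []
--     headerLines = header.split('\n')
--     authors.append(headerLines[0].strip())
--     institution = ""
--     for i in range(1 , len(headerLines)) :
--         line = headerLines[i]
--         if '@' in line:
--             institutions.append(institution)
--             institution = ""
--             for j in range(len(line)):
--                 if line[j].isupper():
--                     authors.append(line[j:])
--                     break
--         else :
--             institution += " "+line
--
--     return institutions, authors
-- ===== SOURCE B (Python) =====
-- def _first_upper_suffix(line):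
--     j = next((i for i, c in enumerate(line) if c.isupper()), None)
--     return [line[j:]] if j is not None else []
--
--
-- def institutions_authors_processing(header):
--     lines = header.split('\n')
--     rev_insts = []   # institutions in reverse order, built back-to-front
--     rev_auths = []   # marker-line authors in reverse order
--     for line in reversed(lines[1:]):
--         if '@' in line:
--             rev_insts.append('')
--             rev_auths += _first_upper_suffix(line)
--         elif rev_insts:
--             rev_insts[-1] = ' ' + line + rev_insts[-1]
--     return rev_insts[::-1], [lines[0].strip()] + rev_auths[::-1]
-- ===== Notes on version B (the rewrite author's own statement) =====
-- stated objective: alternative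
-- what changed: B processes the lines after the first in a single reversed pass, opening a fresh institution slot at each marker line (one containing the at-sign) and prepending non-marker text into the most recently opened slot, then reverses the two accumulators, instead of A's forward loop that carries a pending institution string and flushes it at each marker.
import Mathlib
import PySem

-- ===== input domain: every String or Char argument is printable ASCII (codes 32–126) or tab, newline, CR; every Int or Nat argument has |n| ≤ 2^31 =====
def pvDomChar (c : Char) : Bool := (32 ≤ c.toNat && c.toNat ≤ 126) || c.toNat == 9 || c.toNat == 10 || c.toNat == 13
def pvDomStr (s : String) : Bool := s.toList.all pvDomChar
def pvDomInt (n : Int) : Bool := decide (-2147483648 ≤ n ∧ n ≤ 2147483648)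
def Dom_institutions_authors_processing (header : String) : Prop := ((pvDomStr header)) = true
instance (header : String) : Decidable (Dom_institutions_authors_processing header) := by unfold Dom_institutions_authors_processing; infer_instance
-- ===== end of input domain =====

-- B rebuilds the same result back-to-front in one reversed pass (open an institution slot at each marker line,
-- prepend non-marker text into the most recent slot); objective: alternative decomposition, same cost.
-- ===== PORT A =====

-- A's inner 'for j in range(len(line)): if line[j].isupper(): authors.append(line[j:]); break'
-- (scan positions left to right; at the first uppercase char the remaining suffix IS line[j:])
def aFirstUpper : List Char → List String
  | [] => []
  | c :: cs => if PySem.Chars.isupper c then [String.ofList (c :: cs)] else aFirstUpper cs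

-- one iteration of A's main loop; state = (institutions, authors, institution)
def stepA (st : List String × List String × String) (line : String) : List String × List String × String :=
  if PySem.Str.isIn "@" line then
    (st.1 ++ [st.2.2], st.2.1 ++ aFirstUpper line.toList, "")
  else
    (st.1, st.2.1, st.2.2 ++ (" " ++ line))

def institutions_authors_processing (header : String) : List String × List String :=
  let headerLines := (PySem.Str.split? header "\n").getD []
  let authors := [PySem.Str.strip (PySem.List.pyGetD headerLines 0 "")]
  let r := (PySem.List.pyRange 1 (headerLines.length : Int) 1).foldl
      (fun st i => stepA st (PySem.List.pyGetD headerLines i "")) ([], authors, "")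
  (r.1, r.2.1)

-- ===== PORT B =====

-- Source B: j = next((i for i, c in enumerate(line) if c.isupper()), None); [line[j:]] if found else []
def bFirstUpper (line : String) : List String :=
  match line.toList.findIdx? PySem.Chars.isupper with
  | some j => [String.ofList (line.toList.drop j)]
  | none => []

-- Source B: rev_insts[-1] = ' ' + line + rev_insts[-1]  (update the last element of the python list)
def modifyLast (f : String → String) : List String → List String
  | [] => []
  | [x] => [f x]
  | x :: y :: xs => x :: modifyLast f (y :: xs)

-- one iteration of Source B's reversed loop; state = (rev_insts, rev_auths)
def stepB (st : List String × List String) (line : String) : List String × List String :=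
  if PySem.Str.isIn "@" line then
    (st.1 ++ [""], st.2 ++ bFirstUpper line)
  else
    match st.1 with
    | [] => st
    | _ :: _ => (modifyLast (fun t => " " ++ line ++ t) st.1, st.2)

def institutions_authors_processing_alt (header : String) : List String × List String :=
  let lines := (PySem.Str.split? header "\n").getD []
  let r := (PySem.List.slice lines (some 1) none).reverse.foldl stepB ([], [])
  (r.1.reverse, PySem.Str.strip (PySem.List.pyGetD lines 0 "") :: r.2.reverse)

-- ===== PRECONDITION & SPEC =====
def Spec_institutions_authors_processing (header : String) (out : List String × List String) : Prop := out = institutions_authors_processing_alt header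
instance (header : String) (out : List String × List String) : Decidable (Spec_institutions_authors_processing header out) := by unfold Spec_institutions_authors_processing; infer_instance

-- ===== CLAIM (what is proved, stated in full; the proofs are below) =====
def Claim_equal_institutions_authors_processing : Prop := ∀ (header : String), Dom_institutions_authors_processing header → Spec_institutions_authors_processing header (institutions_authors_processing header)

-- ===== LEMMAS AND PROOFS =====

-- forward "ideal" result of processing the tail lines: (institutions, authors added by marker lines)
def chunk : List String → List String × List String
  | [] => ([], [])
  | l :: ls =>
    let c := chunk ls
    if PySem.Str.isIn "@" l then ("" :: c.1, aFirstUpper l.toList ++ c.2)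
    else
      (match c.1 with
       | [] => []
       | h :: t => (" " ++ l ++ h) :: t, c.2)

-- A's leftover 'institution' accumulator after the loop
def trail (cur : String) : List String → String
  | [] => cur
  | l :: ls => if PySem.Str.isIn "@" l then trail "" ls else trail (cur ++ (" " ++ l)) ls

def prefixFirst (cur : String) : List String → List String
  | [] => []
  | h :: t => (cur ++ h) :: t

theorem aFirstUpper_findIdx (cs : List Char) :
    aFirstUpper cs = (match cs.findIdx? PySem.Chars.isupper with
      | some j => [String.ofList (cs.drop j)]
      | none => []) := by
  induction cs with
  | nil => rfl
  | cons c cs ih =>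
    by_cases h : PySem.Chars.isupper c
    · simp [aFirstUpper, h, List.findIdx?_cons]
    · simp only [aFirstUpper, h, if_false, List.findIdx?_cons, ih, Bool.false_eq_true]
      cases cs.findIdx? PySem.Chars.isupper <;> simp

theorem aFirstUpper_eq_bFirstUpper (line : String) : aFirstUpper line.toList = bFirstUpper line := by
  unfold bFirstUpper
  exact aFirstUpper_findIdx line.toList

theorem aFirstUpper_reverse (cs : List Char) : (aFirstUpper cs).reverse = aFirstUpper cs := by
  induction cs with
  | nil => rfl
  | cons c cs ih => by_cases h : PySem.Chars.isupper c <;> simp [aFirstUpper, h, ih]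

theorem modifyLast_append_singleton (f : String → String) (xs : List String) (x : String) :
    modifyLast f (xs ++ [x]) = xs ++ [f x] := by
  induction xs with
  | nil => rfl
  | cons y ys ih =>
    cases ys with
    | nil => rfl
    | cons z zs => simpa [modifyLast] using ih

theorem foldA_spec (ls : List String) (I Au : List String) (cur : String) :
    ls.foldl stepA (I, Au, cur) =
      (I ++ prefixFirst cur (chunk ls).1, Au ++ (chunk ls).2, trail cur ls) := by
  induction ls generalizing I Au cur with
  | nil => simp [chunk, trail, prefixFirst]
  | cons l ls ih =>
    by_cases h : PySem.Str.isIn "@" l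
    · simp only [List.foldl_cons, stepA, h, if_pos, chunk, trail]
      rw [ih]
      cases hc : (chunk ls).1 with
      | nil => simp [prefixFirst]
      | cons a t => simp [prefixFirst]
    · simp only [List.foldl_cons, stepA, h, chunk, trail]
      rw [ih]
      cases hc : (chunk ls).1 with
      | nil => simp [prefixFirst]
      | cons a t => simp [prefixFirst, String.append_assoc]

theorem foldB_spec (ls : List String) :
    ls.reverse.foldl stepB ([], []) = ((chunk ls).1.reverse, (chunk ls).2.reverse) := by
  rw [List.foldl_reverse]
  induction ls with
  | nil => simp [chunk]
  | cons l ls ih =>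
    rw [List.foldr_cons, ih]
    by_cases h : PySem.Chars.isIn ['@'] l.toList
    · rw [show (stepB ((chunk ls).1.reverse, (chunk ls).2.reverse) l) =
          ((chunk ls).1.reverse ++ [""], (chunk ls).2.reverse ++ bFirstUpper l) from by
        simp [stepB, h]]
      rw [← aFirstUpper_eq_bFirstUpper, ← aFirstUpper_reverse]
      simp [chunk, h]
    · cases hc : (chunk ls).1 with
      | nil => simp [stepB, h, chunk, hc]
      | cons a t =>
        simp [stepB, h, chunk, hc, modifyLast_append_singleton]
        cases t.reverse <;> simp

-- ===== VERDICT (by name: the statement is the Claim_ definition above) =====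
theorem institutions_authors_processing_spec : Claim_equal_institutions_authors_processing := by
  intro header _
  unfold Spec_institutions_authors_processing institutions_authors_processing institutions_authors_processing_alt
  simp only [PySem.List.slice_from_one]
  rw [PySem.List.foldl_pyRange_pyGetD' ((PySem.Str.split? header "\n").getD []) "" stepA
    ([], [PySem.Str.strip (PySem.List.pyGetD ((PySem.Str.split? header "\n").getD []) 0 "")], "") (a := 1) (by omega)]
  rw [foldA_spec, ← List.drop_one, foldB_spec]
  cases hc : (chunk (((PySem.Str.split? header "\n").getD []).tail)).1 with
  | nil => simp [prefixFirst, hc]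
  | cons a t => simp [prefixFirst, hc]
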